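-- pv_equiv track=rewrite | github.com/yanxurui/keepcoding | python/algorithm/gs/1.py | maxLCS
-- ===== SOURCE A (Python) =====
-- from collections import defaultdict, Counter
--
-- def maxLCS(s):
--     # Write your code here
--     rst = prev = 0
--     d1 = defaultdict(int)
--     d2 = Counter(s)
--     for c in s:
--         prev -= min(d1[c], d2[c])
--         d1[c] += 1
--         d2[c] -= 1
--         prev += min(d1[c], d2[c])
--         if prev > rst:
--             rst = prev
--     return rst
-- ===== SOURCE B (Python) =====
-- from collections import Counter
--
-- def maxLCS(s):
--     total = Counter(s)
--     snapshots = []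
--     seen = Counter()
--     for c in s:
--         seen[c] += 1
--         snapshots.append(dict(seen))
--     overlaps = [sum(min(v, total[c] - v) for c, v in snap.items()) for snap in snapshots]
--     return max(overlaps, default=0)
-- ===== Notes on version B (the rewrite author's own statement) =====
-- stated objective: simpler
-- what changed: A makes one stateful pass maintaining two mutating counters and an incrementally-updated running overlap accumulator `prev` with the max folded inline; B has no running overlap state: it stages the work into three passes - record a prefix-count snapshot per position, recompute each split's overlap fresh as sum(min(v, total[c]-v)) from its snapshot, then take max(..., default=0).
import Mathlib
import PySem

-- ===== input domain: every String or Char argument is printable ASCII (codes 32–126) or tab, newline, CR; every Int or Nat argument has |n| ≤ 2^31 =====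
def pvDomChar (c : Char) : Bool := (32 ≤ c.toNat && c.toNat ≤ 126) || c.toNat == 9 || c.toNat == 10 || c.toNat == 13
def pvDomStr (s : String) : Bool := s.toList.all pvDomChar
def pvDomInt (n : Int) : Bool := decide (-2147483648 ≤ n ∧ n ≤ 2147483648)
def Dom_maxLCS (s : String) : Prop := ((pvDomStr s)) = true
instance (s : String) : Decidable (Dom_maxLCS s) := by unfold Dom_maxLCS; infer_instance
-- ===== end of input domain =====

-- B replaces A's single stateful pass (two mutating counters plus an incrementally
-- maintained running overlap `prev`) by three staged passes: record prefix-count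
-- snapshots, recompute each split's overlap fresh from its snapshot and the total
-- counts, then take the max with default 0 (objective: simpler).

-- ===== PORT A =====
-- one iteration of A's loop over state (rst, prev, d1, d2)
def maxLCSstepA (st : Int × Int × PySem.Dict Char Int × PySem.Dict Char Int) (c : Char) :
    Int × Int × PySem.Dict Char Int × PySem.Dict Char Int :=
  let (rst, prev, d1, d2) := st
  let prev := prev - min (d1.getD c 0) (d2.getD c 0)
  let d1 := d1.modify c 0 (· + 1)
  let d2 := d2.modify c 0 (· - 1)
  let prev := prev + min (d1.getD c 0) (d2.getD c 0)
  let rst := if prev > rst then prev else rst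
  (rst, prev, d1, d2)

def maxLCS (s : String) : Int :=
  (s.toList.foldl maxLCSstepA (0, 0, PySem.Dict.empty, PySem.Dict.counter s.toList)).1

-- ===== PORT B =====
-- first pass: append a copy of the running prefix counter after each char
def maxLCSsnap (st : List (PySem.Dict Char Int) × PySem.Dict Char Int) (c : Char) :
    List (PySem.Dict Char Int) × PySem.Dict Char Int :=
  let (snaps, seen) := st
  let seen := seen.modify c 0 (· + 1)
  (snaps ++ [seen], seen)

def maxLCS_alt (s : String) : Int :=
  let total := PySem.Dict.counter s.toList
  let snapshots := (s.toList.foldl maxLCSsnap ([], PySem.Dict.empty)).1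
  let overlaps := snapshots.map (fun snap =>
    (snap.items.map (fun p => min p.2 (total.getD p.1 0 - p.2))).sum)
  PySem.List.maxD overlaps (fun v => v) 0

-- ===== PRECONDITION & SPEC =====
def Spec_maxLCS (s : String) (out : Int) : Prop := out = maxLCS_alt s
instance (s : String) (out : Int) : Decidable (Spec_maxLCS s out) := by unfold Spec_maxLCS; infer_instance

-- ===== CLAIM (what is proved, stated in full; the proofs are below) =====
def Claim_equal_maxLCS : Prop := ∀ (s : String), Dom_maxLCS s → Spec_maxLCS s (maxLCS s)

-- ===== LEMMAS AND PROOFS =====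

-- the mathematical overlap at a split: pre = s.take j, suf = s.drop j
def pvOvSplit (pre suf : List Char) : Int :=
  ((PySem.Set.ofList pre).map (fun c => min (pre.count c : Int) (suf.count c : Int))).sum

-- the list of overlaps at all split points 1..n
def pvOvList (s : List Char) : List Int :=
  (List.range s.length).map (fun i => pvOvSplit (s.take (i + 1)) (s.drop (i + 1)))

-- the overlap sum on A's dict state
def pvOv (d1 d2 : PySem.Dict Char Int) : Int :=
  (d1.keys.map (fun ch => min (d1.getD ch 0) (d2.getD ch 0))).sum

-- A's second dict after processing prefix p of s
def pvD2 (s p : List Char) : PySem.Dict Char Int :=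
  p.foldl (fun d c => d.modify c 0 (· - 1)) (PySem.Dict.counter s)

-- sum over a nodup list of a function changed only at one member c
lemma pv_sum_update {l : List Char} {c : Char} (f g : Char → Int)
    (hnd : l.Nodup) (hc : c ∈ l) (h : ∀ x ∈ l, x ≠ c → f x = g x) :
    (l.map f).sum = (l.map g).sum + f c - g c := by
  induction l with
  | nil => cases hc
  | cons a t ih =>
    rcases List.mem_cons.mp hc with rfl | hct
    · have : ∀ x ∈ t, f x = g x := fun x hx =>
        h x (List.mem_cons_of_mem _ hx) (fun he => (List.nodup_cons.mp hnd).1 (he ▸ hx))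
      simp [List.map_congr_left this]; ring
    · have ha : f a = g a := h a (List.mem_cons_self) (fun he => (List.nodup_cons.mp hnd).1 (he ▸ hct))
      have := ih (List.nodup_cons.mp hnd).2 hct (fun x hx => h x (List.mem_cons_of_mem _ hx))
      simp [ha, this]; ring

-- pvOv tracks A's incremental update of prev
lemma pv_ov_step (d1 d2 : PySem.Dict Char Int) (c : Char) (hnd : d1.keys.Nodup)
    (hpos : d1.contains c = false → 0 ≤ d2.getD c 0) :
    pvOv (d1.modify c 0 (· + 1)) (d2.modify c 0 (· - 1)) =
      pvOv d1 d2 - min (d1.getD c 0) (d2.getD c 0)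
        + min ((d1.modify c 0 (· + 1)).getD c 0) ((d2.modify c 0 (· - 1)).getD c 0) := by
  have hoff : ∀ x, x ≠ c →
      min ((d1.modify c 0 (· + 1)).getD x 0) ((d2.modify c 0 (· - 1)).getD x 0)
        = min (d1.getD x 0) (d2.getD x 0) := by
    intro x hx
    rw [PySem.Dict.getD_modify_of_ne _ _ _ hx, PySem.Dict.getD_modify_of_ne _ _ _ hx]
  by_cases hc : d1.contains c = true
  · have hkeys : (d1.modify c 0 (· + 1)).keys = d1.keys := by
      rw [PySem.Dict.keys_modify, PySem.Dict.keys_insert_of_contains _ _ hc]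
    have hmem : c ∈ d1.keys := (PySem.Dict.contains_iff_mem_keys _ _).mp hc
    unfold pvOv
    rw [hkeys, pv_sum_update _ _ hnd hmem (fun x _ hx => hoff x hx)]
    ring
  · have hc' : d1.contains c = false := by simpa using hc
    have hkeys : (d1.modify c 0 (· + 1)).keys = d1.keys ++ [c] := by
      rw [PySem.Dict.keys_modify, PySem.Dict.keys_insert_of_not_contains _ _ hc']
    have hd1c : d1.getD c 0 = 0 := PySem.Dict.getD_of_not_contains _ _ hc'
    have hmin0 : min (d1.getD c 0) (d2.getD c 0) = 0 := by
      rw [hd1c]; exact min_eq_left (hpos hc')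
    unfold pvOv
    rw [hkeys]
    have hsame : ∀ x ∈ d1.keys,
        min ((d1.modify c 0 (· + 1)).getD x 0) ((d2.modify c 0 (· - 1)).getD x 0)
          = min (d1.getD x 0) (d2.getD x 0) := by
      intro x hx
      refine hoff x (fun he => ?_)
      rw [(PySem.Dict.contains_iff_mem_keys d1 c).mpr (he ▸ hx)] at hc'
      exact Bool.true_eq_false.mp hc'
    rw [List.map_append, List.sum_append, List.map_congr_left hsame]
    simp [hmin0]

-- A's decrement loop: a lookup in pvD2 is total count minus prefix count
lemma pv_d2_getD (l : List Char) : ∀ (d : PySem.Dict Char Int) (c : Char),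
    (l.foldl (fun d x => d.modify x 0 (· - 1)) d).getD c 0 = d.getD c 0 - l.count c := by
  induction l with
  | nil => intro d c; simp
  | cons a l ih =>
    intro d c
    rw [List.foldl_cons, ih, PySem.Dict.getD_modify]
    by_cases h : c = a
    · subst h; simp; omega
    · simp [h, Ne.symm h]

-- pvOv on A's state after prefix p equals the mathematical split overlap
lemma pv_ov_eq_split (p t : List Char) :
    pvOv (PySem.Dict.counter p) (pvD2 (p ++ t) p) = pvOvSplit p t := by
  unfold pvOv pvOvSplit pvD2
  rw [show (PySem.Dict.counter p).keys = PySem.Set.ofList p from PySem.Dict.keys_counter p]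
  refine congrArg List.sum (List.map_congr_left ?_)
  intro c _
  rw [PySem.Dict.getD_counter, pv_d2_getD, PySem.Dict.getD_counter, List.count_append]
  congr 1
  omega

-- A's loop computes the running max of the split overlaps
lemma pv_A_loop (t : List Char) : ∀ (p : List Char) (rst : Int),
    (t.foldl maxLCSstepA (rst, pvOv (PySem.Dict.counter p) (pvD2 (p ++ t) p),
        PySem.Dict.counter p, pvD2 (p ++ t) p)).1
      = ((List.range t.length).map
          (fun i => pvOvSplit ((p ++ t).take (p.length + i + 1)) ((p ++ t).drop (p.length + i + 1)))).foldl
          max rst := by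
  induction t with
  | nil => intro p rst; simp
  | cons c t ih =>
    intro p rst
    have hnd : (PySem.Dict.counter p).keys.Nodup := PySem.Dict.nodup_keys_counter p
    have hpos : (PySem.Dict.counter p).contains c = false → 0 ≤ (pvD2 (p ++ c :: t) p).getD c 0 := by
      intro _
      unfold pvD2
      rw [pv_d2_getD, PySem.Dict.getD_counter, List.count_append]
      have h1 : (1 : Int) ≤ ((c :: t).count c : Int) := by
        exact_mod_cast Nat.one_le_iff_ne_zero.mpr (by simp)
      push_cast
      omega
    -- one step of A
    have hd1' : (PySem.Dict.counter p).modify c 0 (· + 1) = PySem.Dict.counter (p ++ [c]) :=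
      (PySem.Dict.counter_append_singleton p c).symm
    have hd2' : (pvD2 (p ++ c :: t) p).modify c 0 (· - 1) = pvD2 ((p ++ [c]) ++ t) (p ++ [c]) := by
      unfold pvD2
      rw [List.foldl_append]
      simp
    have hstep := pv_ov_step (PySem.Dict.counter p) (pvD2 (p ++ c :: t) p) c hnd hpos
    simp only [List.foldl_cons, maxLCSstepA]
    have hprev' :
        pvOv (PySem.Dict.counter p) (pvD2 (p ++ c :: t) p)
            - min ((PySem.Dict.counter p).getD c 0) ((pvD2 (p ++ c :: t) p).getD c 0)
            + min (((PySem.Dict.counter p).modify c 0 (· + 1)).getD c 0)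
                  (((pvD2 (p ++ c :: t) p).modify c 0 (· - 1)).getD c 0)
          = pvOv (PySem.Dict.counter (p ++ [c])) (pvD2 ((p ++ [c]) ++ t) (p ++ [c])) := by
      rw [← hd1', ← hd2', hstep]
    have hassoc : p ++ c :: t = (p ++ [c]) ++ t := by simp
    rw [hprev', hd1', hd2']
    have := ih (p ++ [c]) (if pvOv (PySem.Dict.counter (p ++ [c])) (pvD2 ((p ++ [c]) ++ t) (p ++ [c]))
        > rst then pvOv (PySem.Dict.counter (p ++ [c])) (pvD2 ((p ++ [c]) ++ t) (p ++ [c])) else rst)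
    rw [this]
    -- now massage the index list on the right
    rw [List.length_cons, List.range_succ_eq_map, List.map_cons, List.foldl_cons, List.map_map]
    have hsplit0 := pv_ov_eq_split (p ++ [c]) t
    rw [hassoc]
    have htake : ((p ++ [c]) ++ t).take (p.length + 0 + 1) = p ++ [c] := by
      rw [show p.length + 0 + 1 = (p ++ [c]).length by simp]
      exact List.take_left
    have hdrop : ((p ++ [c]) ++ t).drop (p.length + 0 + 1) = t := by
      rw [show p.length + 0 + 1 = (p ++ [c]).length by simp]
      exact List.drop_left
    rw [htake, hdrop, ← hsplit0]
    congr 1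
    · rw [max_def]
      split_ifs <;> omega
    · refine List.map_congr_left ?_
      intro i _
      simp only [Function.comp]
      congr 2 <;> · congr 1; simp; omega

-- A equals the fold of max over pvOvList
lemma pv_A_eq (s : List Char) :
    (s.foldl maxLCSstepA (0, 0, PySem.Dict.empty, PySem.Dict.counter s)).1
      = (pvOvList s).foldl max 0 := by
  have h0 : pvOv (PySem.Dict.counter ([] : List Char)) (pvD2 ([] ++ s) []) = 0 := by
    simp [pvOv, pvD2, PySem.Dict.counter]
  have := pv_A_loop s [] 0
  rw [h0] at this
  simpa [pvOvList, pvD2, PySem.Dict.counter] using this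

-- every split overlap is nonnegative
lemma pv_split_nonneg (pre suf : List Char) : 0 ≤ pvOvSplit pre suf := by
  unfold pvOvSplit
  refine List.sum_nonneg ?_
  intro x hx
  obtain ⟨c, _, rfl⟩ := List.mem_map.mp hx
  have := Int.natCast_nonneg (pre.count c)
  have := Int.natCast_nonneg (suf.count c)
  omega

-- max(l, default=0) is foldl max 0 when all elements are nonnegative
lemma pv_maxD_eq_foldl (l : List Int) (h : ∀ x ∈ l, 0 ≤ x) :
    PySem.List.maxD l (fun v => v) 0 = l.foldl max 0 := by
  cases l with
  | nil => rfl
  | cons x l =>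
    unfold PySem.List.maxD
    rw [PySem.List.max?_id_cons, Option.getD_some, List.foldl_cons,
      max_eq_right (h x (List.mem_cons_self))]

-- B's snapshot pass records the prefix counters in order
lemma pv_snaps (t : List Char) : ∀ (p : List Char) (acc : List (PySem.Dict Char Int)),
    (t.foldl maxLCSsnap (acc, PySem.Dict.counter p)).1
      = acc ++ (List.range t.length).map (fun i => PySem.Dict.counter (p ++ t.take (i + 1))) := by
  induction t with
  | nil => intro p acc; simp
  | cons c t ih =>
    intro p acc
    simp only [List.foldl_cons, maxLCSsnap]
    rw [show (PySem.Dict.counter p).modify c 0 (· + 1) = PySem.Dict.counter (p ++ [c]) from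
      (PySem.Dict.counter_append_singleton p c).symm]
    rw [ih (p ++ [c]) (acc ++ [PySem.Dict.counter (p ++ [c])])]
    rw [List.length_cons, List.range_succ_eq_map, List.map_cons, List.map_map,
      List.append_assoc, List.singleton_append]
    refine congrArg (acc ++ ·) ?_
    refine congrArg₂ List.cons (by simp) ?_
    refine List.map_congr_left ?_
    intro i _
    simp [Function.comp, List.take_succ_cons]
  
-- the fresh overlap computed from a prefix snapshot is the split overlap
lemma pv_snap_overlap (s : List Char) (k : Nat) :
    ((PySem.Dict.counter (s.take k)).items.map
        (fun p => min p.2 ((PySem.Dict.counter s).getD p.1 0 - p.2))).sum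
      = pvOvSplit (s.take k) (s.drop k) := by
  rw [PySem.Dict.items_counter, List.map_map]
  unfold pvOvSplit
  refine congrArg List.sum (List.map_congr_left ?_)
  intro c _
  simp only [Function.comp, PySem.Dict.getD_counter]
  have hcnt : s.count c = (s.take k).count c + (s.drop k).count c := by
    conv_lhs => rw [← List.take_append_drop k s]
    exact List.count_append ..
  rw [hcnt]
  congr 1
  push_cast
  ring

-- B equals the fold of max over pvOvList
lemma pv_B_eq (s : String) :
    maxLCS_alt s = (pvOvList s.toList).foldl max 0 := by
  unfold maxLCS_alt
  show PySem.List.maxD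
      (((s.toList.foldl maxLCSsnap ([], PySem.Dict.empty)).1).map (fun snap =>
        (snap.items.map (fun p => min p.2 ((PySem.Dict.counter s.toList).getD p.1 0 - p.2))).sum))
      (fun v => v) 0 = (pvOvList s.toList).foldl max 0
  have h0 : (PySem.Dict.empty : PySem.Dict Char Int) = PySem.Dict.counter ([] : List Char) := rfl
  rw [h0, pv_snaps s.toList [] [], List.nil_append, List.map_map]
  have hmap : ∀ i ∈ List.range s.toList.length,
      ((fun snap => (snap.items.map
          (fun p => min p.2 ((PySem.Dict.counter s.toList).getD p.1 0 - p.2))).sum) ∘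
        fun i => PySem.Dict.counter ([] ++ s.toList.take (i + 1))) i
        = pvOvSplit (s.toList.take (i + 1)) (s.toList.drop (i + 1)) := by
    intro i _
    simp only [Function.comp, List.nil_append]
    exact pv_snap_overlap s.toList (i + 1)
  rw [List.map_congr_left hmap]
  unfold pvOvList
  refine pv_maxD_eq_foldl _ ?_
  intro x hx
  obtain ⟨i, _, rfl⟩ := List.mem_map.mp hx
  exact pv_split_nonneg _ _

-- ===== VERDICT (by name: the statement is the Claim_ definition above) =====
theorem maxLCS_spec : Claim_equal_maxLCS := by
  intro s _
  unfold Spec_maxLCS maxLCS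
  rw [pv_A_eq, pv_B_eq]
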